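-- pv_equiv track=rewrite | github.com/jhowilbur/challenges-and-datastructure_python | challenges/codility/test/3/3_counting_game.py | solution
-- ===== SOURCE A (Python) =====
-- def solution(X):
--     # alright, this test I suppose is more simple than the others
--     # if the number is 7, then it and all multiples are invalid
--     # and so, numbers multiples of 7 are also invalid
--     # hmmmmm to resolve that, well we need to check the validation of the numbers, right?
--
--     # check if the number is valid
--     # find the next valid number
--
--     n = X  # our given number
--
--     def has_seven(num):
--         return '7' in str(num)
--
--     def is_invalid(num):
--         if has_seven(num) or num % 7 == 0:
--             return True
--
--         for i in range(1, num + 1):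
--             if has_seven(i) and num % i == 0:
--                 return True
--
--         return False
--
--     if is_invalid(n):
--         return -1
--
--     n += 1
--     while is_invalid(n):
--         n += 1
--
--     return n
-- ===== SOURCE B (Python) =====
-- def solution(X):
--     # a number is invalid if it contains the digit seven, is a multiple of
--     # seven, or has a divisor containing that digit; divisors are enumerated
--     # in pairs (d, num // d) with d only up to the square root
--     def has_seven(num):
--         return '7' in str(num)
--
--     def is_invalid(num):
--         if has_seven(num) or num % 7 == 0:
--             return True
--         d = 1
--         while d * d <= num:
--             if num % d == 0 and (has_seven(d) or has_seven(num // d)):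
--                 return True
--             d += 1
--         return False
--
--     if is_invalid(X):
--         return -1
--     n = X + 1
--     while is_invalid(n):
--         n += 1
--     return n
-- ===== Notes on version B (the rewrite author's own statement) =====
-- stated objective: alternative
-- what changed: the validity test checks the number itself and the multiple-of-seven rule directly and then enumerates divisors only up to the square root in cofactor pairs, instead of A's scan over every candidate divisor below num
import Mathlib
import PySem

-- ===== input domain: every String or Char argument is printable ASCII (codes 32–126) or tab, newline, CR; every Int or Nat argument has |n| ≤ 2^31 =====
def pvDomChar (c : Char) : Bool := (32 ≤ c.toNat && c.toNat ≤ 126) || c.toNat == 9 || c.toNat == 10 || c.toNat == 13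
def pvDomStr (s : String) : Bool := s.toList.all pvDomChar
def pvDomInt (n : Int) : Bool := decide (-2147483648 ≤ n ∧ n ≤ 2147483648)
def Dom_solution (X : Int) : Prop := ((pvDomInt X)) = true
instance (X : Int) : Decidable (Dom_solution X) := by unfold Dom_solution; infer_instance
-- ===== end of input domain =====

-- B's validity test checks the number itself and the multiple-of-seven rule directly, then scans divisors only up to the square root in cofactor pairs, instead of A's scan over every candidate divisor below num.


-- ===== PORT A =====
-- '7' in str(num)  (shared helper: both Pythons define the same has_seven test)
def hasSeven (num : Int) : Bool := PySem.Str.isIn "7" (PySem.Int.toStr num)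

-- A's is_invalid: direct digit / multiple-of-seven test, then a scan over ALL candidate divisors up to num
def isInvalidA (num : Int) : Bool :=
  if hasSeven num || PySem.Int.mod num 7 == 0 then true
  else (PySem.List.pyRange 1 (num + 1) 1).any
        (fun i => hasSeven i && PySem.Int.mod num i == 0)

-- the 'n += 1; while is_invalid(n): n += 1' loop; the Nat fuel is a pure
-- totality guard (5000000000 steps always suffice on Dom: 2148000011 is valid)
def findNextA : Nat → Int → Int
  | 0, n => n
  | fuel + 1, n => if isInvalidA n then findNextA fuel (n + 1) else n

def solution (X : Int) : Int :=
  if isInvalidA X then -1 else findNextA 5000000000 (X + 1)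

-- ===== PORT B =====
-- B's divisor scan 'd = 1; while d*d <= num: ... d += 1'; the Nat fuel is a
-- pure totality guard (the loop stops once d exceeds sqrt(num), well within
-- the fuel for every num the outer search reaches)
def sqrtLoop : Nat → Int → Int → Bool
  | 0, _, _ => false
  | fuel + 1, num, d =>
    if d * d ≤ num then
      if PySem.Int.mod num d == 0
          && (hasSeven d || hasSeven (PySem.Int.floordiv num d)) then true
      else sqrtLoop fuel num (d + 1)
    else false

-- B's is_invalid: same quick checks, then the sqrt-bounded divisor scan
def isInvalidB (num : Int) : Bool :=
  if hasSeven num || PySem.Int.mod num 7 == 0 then true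
  else sqrtLoop 100000 num 1

def findNextB : Nat → Int → Int
  | 0, n => n
  | fuel + 1, n => if isInvalidB n then findNextB fuel (n + 1) else n

def solution_alt (X : Int) : Int :=
  if isInvalidB X then -1 else findNextB 5000000000 (X + 1)

-- ===== PRECONDITION & SPEC =====
def Spec_solution (X : Int) (out : Int) : Prop := out = solution_alt X
instance (X : Int) (out : Int) : Decidable (Spec_solution X out) := by unfold Spec_solution; infer_instance

-- ===== CLAIM (what is proved, stated in full; the proofs are below) =====
def Claim_equal_solution : Prop := ∀ (X : Int), Dom_solution X → Spec_solution X (solution X)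

-- ===== LEMMAS AND PROOFS =====

theorem sqrtLoop_iff (fuel : Nat) (num d : Int) (hd : 1 ≤ d)
    (hfuel : num < (d + fuel) * (d + fuel)) :
    sqrtLoop fuel num d = true ↔
      ∃ e : Int, d ≤ e ∧ e * e ≤ num ∧ e ∣ num ∧
        (hasSeven e = true ∨ hasSeven (num / e) = true) := by
  induction fuel generalizing d with
  | zero =>
    simp only [Nat.cast_zero, add_zero] at hfuel
    refine iff_of_false (by simp [sqrtLoop]) ?_
    rintro ⟨e, he1, he2, -, -⟩
    nlinarith
  | succ fuel ih =>
    rw [sqrtLoop]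
    split
    case isTrue h =>
      split
      case isTrue hbody =>
        simp only [Bool.and_eq_true, Bool.or_eq_true, beq_iff_eq,
          PySem.Int.mod_eq_zero_iff_dvd,
          PySem.Int.floordiv_eq_ediv_of_pos (by omega : (0:Int) < d)] at hbody
        exact iff_of_true rfl ⟨d, le_refl d, h, hbody.1, hbody.2⟩
      case isFalse hbody =>
        rw [ih (d + 1) (by omega) (by push_cast at hfuel ⊢; nlinarith)]
        constructor
        · rintro ⟨e, he1, he2, he3, he4⟩; exact ⟨e, by omega, he2, he3, he4⟩
        · rintro ⟨e, he1, he2, he3, he4⟩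
          refine ⟨e, ?_, he2, he3, he4⟩
          rcases eq_or_lt_of_le he1 with rfl | hlt
          · exfalso; apply hbody
            have h4' : (hasSeven d || hasSeven (PySem.Int.floordiv num d)) = true := by
              rw [PySem.Int.floordiv_eq_ediv_of_pos (by omega : (0:Int) < d)]
              simpa using he4
            simp [PySem.Int.mod_eq_zero_iff_dvd, he3, h4']
          · omega
    case isFalse h =>
      refine iff_of_false (by simp) ?_
      rintro ⟨e, he1, he2, -, -⟩
      have : d * d ≤ e * e := by nlinarith
      omega

theorem inv_eq (num : Int) (hnum : num < 10000200001) :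
    isInvalidA num = isInvalidB num := by
  unfold isInvalidA isInvalidB
  split
  · rfl
  · by_cases hn : num ≤ 0
    · rw [PySem.List.pyRange_one_eq_nil (by omega)]
      have h0 : sqrtLoop 100000 num 1 = false := by
        rw [show (100000 : Nat) = 99999 + 1 from rfl, sqrtLoop,
          if_neg (by omega : ¬ (1 : Int) * 1 ≤ num)]
      simp [h0]
    · have hn1 : 1 ≤ num := by omega
      rw [Bool.eq_iff_iff, List.any_eq_true,
        sqrtLoop_iff 100000 num 1 (by omega) (by push_cast; omega)]
      constructor
      · rintro ⟨i, hmem, hp⟩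
        rw [PySem.List.mem_pyRange_one] at hmem
        obtain ⟨h7, hm⟩ : hasSeven i = true ∧ PySem.Int.mod num i = 0 := by simpa using hp
        have h1 : 1 ≤ i := hmem.1
        have hdvd : i ∣ num := (PySem.Int.mod_eq_zero_iff_dvd num i).mp hm
        by_cases hi : i * i ≤ num
        · exact ⟨i, h1, hi, hdvd, Or.inl h7⟩
        · obtain ⟨k, hk⟩ := hdvd
          have hk1 : 1 ≤ k := by nlinarith
          have hkk : k * k ≤ num := by nlinarith
          have hke : num / k = i := by
            rw [hk, mul_comm]; exact Int.mul_ediv_cancel_left i (by omega)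
          exact ⟨k, hk1, hkk, ⟨i, by rw [hk, mul_comm]⟩, Or.inr (by rw [hke]; exact h7)⟩
      · rintro ⟨e, he1, he2, hdvd, h7 | h7⟩
        · refine ⟨e, PySem.List.mem_pyRange_one.mpr ⟨he1, by nlinarith⟩, ?_⟩
          simp [h7, PySem.Int.mod_eq_zero_iff_dvd, hdvd]
        · obtain ⟨k, hk⟩ := hdvd
          have hke : num / e = k := by rw [hk]; exact Int.mul_ediv_cancel_left k (by omega)
          have hk1 : 1 ≤ k := by nlinarith
          rw [hke] at h7
          refine ⟨k, PySem.List.mem_pyRange_one.mpr ⟨hk1, by nlinarith⟩, ?_⟩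
          simp [h7, PySem.Int.mod_eq_zero_iff_dvd]
          exact ⟨e, by rw [hk, mul_comm]⟩

theorem findNext_eq (fuel : Nat) (n : Int) (hb : n + fuel ≤ 10000200001) :
    findNextA fuel n = findNextB fuel n := by
  induction fuel generalizing n with
  | zero => rfl
  | succ fuel ih =>
    push_cast at hb
    rw [findNextA, findNextB, ← inv_eq n (by omega)]
    split
    · exact ih (n + 1) (by omega)
    · rfl

-- ===== VERDICT (by name: the statement is the Claim_ definition above) =====
theorem solution_spec : Claim_equal_solution := by
  intro X hdom
  have hX : X ≤ 2147483648 := by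
    have := of_decide_eq_true hdom
    exact this.2
  unfold Spec_solution solution solution_alt
  rw [← inv_eq X (by omega), findNext_eq 5000000000 (X + 1) (by push_cast; omega)]
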